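-- pv_equiv track=rewrite | github.com/MarcYin/spectral_library | src/spectral_library/mapping.py | _flatten_knn_index_artifact_names
-- ===== SOURCE A (Python) =====
-- from typing import Any, Callable, Mapping, Sequence
--
-- def _flatten_knn_index_artifact_names(knn_index_artifacts: Mapping[str, Mapping[str, Mapping[str, str]]]) -> tuple[str, ...]:
--     file_names: list[str] = []
--     for backend in sorted(knn_index_artifacts):
--         backend_payload = knn_index_artifacts[backend]
--         for sensor_id in sorted(backend_payload):
--             for segment in sorted(backend_payload[sensor_id]):
--                 file_name = str(backend_payload[sensor_id][segment]).strip()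
--                 if file_name:
--                     file_names.append(file_name)
--     return tuple(file_names)
-- ===== SOURCE B (Python) =====
-- from typing import Any, Callable, Mapping, Sequence
--
-- def _flatten_knn_index_artifact_names(knn_index_artifacts: Mapping[str, Mapping[str, Mapping[str, str]]]) -> tuple[str, ...]:
--     def flatten(node: Any) -> list[str]:
--         if isinstance(node, Mapping):
--             return [name for key in sorted(node) for name in flatten(node[key])]
--         s = str(node).strip()
--         return [s] if s else []
--     return tuple(flatten(knn_index_artifacts))
-- ===== Notes on version B (the rewrite author's own statement) =====
-- stated objective: simpler
-- what changed: Replaces the three hand-written nested sorted loops with a mutable accumulator by a single generic recursive flatten helper over the nested Mapping that concatenates per sorted key and filters empty stripped names at the leaves.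
import Mathlib
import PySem

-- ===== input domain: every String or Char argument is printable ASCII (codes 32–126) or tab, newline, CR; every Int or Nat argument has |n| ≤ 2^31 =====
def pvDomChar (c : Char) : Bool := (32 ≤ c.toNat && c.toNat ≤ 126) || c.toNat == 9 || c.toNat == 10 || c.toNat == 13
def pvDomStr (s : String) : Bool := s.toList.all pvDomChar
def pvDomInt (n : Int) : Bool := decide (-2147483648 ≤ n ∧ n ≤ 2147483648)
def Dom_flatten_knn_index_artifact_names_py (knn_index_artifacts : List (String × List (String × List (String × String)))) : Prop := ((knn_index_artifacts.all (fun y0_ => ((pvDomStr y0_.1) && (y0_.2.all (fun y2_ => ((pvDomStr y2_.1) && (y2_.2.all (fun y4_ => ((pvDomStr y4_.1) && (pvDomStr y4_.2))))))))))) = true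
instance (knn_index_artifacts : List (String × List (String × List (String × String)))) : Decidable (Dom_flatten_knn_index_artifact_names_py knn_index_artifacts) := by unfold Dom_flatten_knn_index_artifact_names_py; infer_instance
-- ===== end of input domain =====

-- B replaces A's three explicit nested sorted loops by one generic recursive flatten over the nested mapping (simpler decomposition, same cost).


-- ===== PORT A =====
def flatten_knn_index_artifact_names_py (knn_index_artifacts : List (String × List (String × List (String × String)))) : List String :=
  (PySem.List.sorted (knn_index_artifacts.map Prod.fst) id false).foldl
    (fun file_names backend =>
      -- backend_payload = knn_index_artifacts[backend]; the key comes from the dict itself, so the default is unreachable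
      let backend_payload := (PySem.Dict.mk knn_index_artifacts).getD backend []
      (PySem.List.sorted (backend_payload.map Prod.fst) id false).foldl
        (fun file_names sensor_id =>
          let sensors := (PySem.Dict.mk backend_payload).getD sensor_id []
          (PySem.List.sorted (sensors.map Prod.fst) id false).foldl
            (fun file_names segment =>
              let file_name := PySem.Str.strip ((PySem.Dict.mk sensors).getD segment "")
              if file_name ≠ "" then file_names ++ [file_name] else file_names)
            file_names)
        file_names)
    []

-- ===== PORT B =====
-- B's generic recursive `flatten` cannot be one polymorphic Lean function (each nesting level has a
-- different type), so it is transliterated as one helper per instantiation, leaf case first; each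
-- Mapping case is B's comprehension: concatenate flatten(node[key]) over sorted(node).
def fkFlattenLeaf (node : String) : List String :=
  let s := PySem.Str.strip node
  if s = "" then [] else [s]

def fkFlatten1 (node : List (String × String)) : List String :=
  (PySem.List.sorted (node.map Prod.fst) id false).flatMap
    (fun key => fkFlattenLeaf ((PySem.Dict.mk node).getD key ""))

def fkFlatten2 (node : List (String × List (String × String))) : List String :=
  (PySem.List.sorted (node.map Prod.fst) id false).flatMap
    (fun key => fkFlatten1 ((PySem.Dict.mk node).getD key []))

def flatten_knn_index_artifact_names_py_alt (knn_index_artifacts : List (String × List (String × List (String × String)))) : List String :=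
  (PySem.List.sorted (knn_index_artifacts.map Prod.fst) id false).flatMap
    (fun key => fkFlatten2 ((PySem.Dict.mk knn_index_artifacts).getD key []))

-- ===== PRECONDITION & SPEC =====
def Spec_flatten_knn_index_artifact_names_py (knn_index_artifacts : List (String × List (String × List (String × String)))) (out : List String) : Prop := out = flatten_knn_index_artifact_names_py_alt knn_index_artifacts
instance (knn_index_artifacts : List (String × List (String × List (String × String)))) (out : List String) : Decidable (Spec_flatten_knn_index_artifact_names_py knn_index_artifacts out) := by unfold Spec_flatten_knn_index_artifact_names_py; infer_instance

-- ===== CLAIM (what is proved, stated in full; the proofs are below) =====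
def Claim_equal_flatten_knn_index_artifact_names_py : Prop := ∀ (knn_index_artifacts : List (String × List (String × List (String × String)))), Dom_flatten_knn_index_artifact_names_py knn_index_artifacts → Spec_flatten_knn_index_artifact_names_py knn_index_artifacts (flatten_knn_index_artifact_names_py knn_index_artifacts)

-- ===== LEMMAS AND PROOFS =====

-- inner loop: A's append-if accumulator over sorted segments equals flatMap of B's leaf helper
lemma fk_inner (sensors : List (String × String)) (acc : List String) :
    (PySem.List.sorted (sensors.map Prod.fst) id false).foldl
      (fun file_names segment =>
        let file_name := PySem.Str.strip ((PySem.Dict.mk sensors).getD segment "")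
        if file_name ≠ "" then file_names ++ [file_name] else file_names)
      acc = acc ++ fkFlatten1 sensors := by
  rw [fkFlatten1]
  refine Eq.trans (PySem.List.foldl_congr_mem _ _
    (fun a key => a ++ fkFlattenLeaf ((PySem.Dict.mk sensors).getD key "")) _
    (fun a x _ => ?_)) (PySem.List.foldl_append_eq_flatMap _ _ _)
  simp only [fkFlattenLeaf]
  by_cases h : PySem.Str.strip ((PySem.Dict.mk sensors).getD x "") = "" <;> simp [h]

-- middle loop: A's sensor loop equals flatMap of B's level-1 helper
lemma fk_mid (payload : List (String × List (String × String))) (acc : List String) :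
    (PySem.List.sorted (payload.map Prod.fst) id false).foldl
      (fun file_names sensor_id =>
        let sensors := (PySem.Dict.mk payload).getD sensor_id []
        (PySem.List.sorted (sensors.map Prod.fst) id false).foldl
          (fun file_names segment =>
            let file_name := PySem.Str.strip ((PySem.Dict.mk sensors).getD segment "")
            if file_name ≠ "" then file_names ++ [file_name] else file_names)
          file_names)
      acc = acc ++ fkFlatten2 payload := by
  rw [fkFlatten2]
  refine Eq.trans (PySem.List.foldl_congr_mem _ _
    (fun a key => a ++ fkFlatten1 ((PySem.Dict.mk payload).getD key [])) _
    (fun a x _ => ?_)) (PySem.List.foldl_append_eq_flatMap _ _ _)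
  exact fk_inner _ a

-- ===== VERDICT (by name: the statement is the Claim_ definition above) =====
theorem flatten_knn_index_artifact_names_py_spec : Claim_equal_flatten_knn_index_artifact_names_py := by
  intro xs _
  unfold Spec_flatten_knn_index_artifact_names_py flatten_knn_index_artifact_names_py
    flatten_knn_index_artifact_names_py_alt
  refine Eq.trans (PySem.List.foldl_congr_mem _ _
    (fun a key => a ++ fkFlatten2 ((PySem.Dict.mk xs).getD key [])) _
    (fun a x _ => ?_)) (PySem.List.foldl_append_eq_flatMap _ _ _)
  exact fk_mid _ a
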